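-- pv_equiv track=rewrite | github.com/Dadajon125/week6 | week6assignment.py | get_neighborhood_value_summary
-- ===== SOURCE A (Python) =====
-- def get_neighborhood_value_summary(listings):
--     neighborhoods = []
--
--     for listing in listings:
--         name = listing[1]
--         if name not in neighborhoods:
--             neighborhoods.append(name)
--
--     neighborhoods.sort()
--     summary = []
--
--     for name in neighborhoods:
--         total_value = 0
--         for listing in listings:
--             if listing[1] == name:
--                 total_value += listing[2]
--         summary.append((name, total_value))
--
--     return summary
-- ===== SOURCE B (Python) =====
-- def get_neighborhood_value_summary(listings):
--     totals = {}
--     for listing in listings: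
--         name = listing[1]
--         totals[name] = totals.get(name, 0) + listing[2]
--     return [(name, totals.get(name, 0)) for name in sorted(totals)]
-- ===== Notes on version B (the rewrite author's own statement) =====
-- stated objective: faster
-- what changed: Replaces the quadratic rescan (for each distinct name, sum over the whole listings list) with a single-pass dict aggregation keyed by name followed by sorting the keys.
import Mathlib
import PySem

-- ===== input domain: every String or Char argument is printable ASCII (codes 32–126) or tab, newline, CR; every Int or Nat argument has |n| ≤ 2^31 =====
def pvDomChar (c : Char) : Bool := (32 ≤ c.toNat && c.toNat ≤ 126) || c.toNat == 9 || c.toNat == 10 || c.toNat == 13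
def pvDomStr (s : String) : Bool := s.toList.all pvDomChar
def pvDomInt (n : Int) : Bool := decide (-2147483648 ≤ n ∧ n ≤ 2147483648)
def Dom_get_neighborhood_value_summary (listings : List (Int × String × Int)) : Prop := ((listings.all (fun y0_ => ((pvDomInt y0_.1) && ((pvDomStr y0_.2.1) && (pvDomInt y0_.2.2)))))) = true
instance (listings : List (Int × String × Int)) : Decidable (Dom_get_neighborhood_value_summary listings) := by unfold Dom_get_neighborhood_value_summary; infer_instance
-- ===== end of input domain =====

-- B replaces A's per-name rescans of the whole list by a one-pass dict aggregation plus a key sort (faster).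

-- ===== PORT A =====
def get_neighborhood_value_summary (listings : List (Int × String × Int)) : List (String × Int) :=
  let neighborhoods : List String :=
    listings.foldl (fun ns l => if l.2.1 ∈ ns then ns else ns ++ [l.2.1]) []
  let sortedN := PySem.List.sorted neighborhoods (fun x => x) false
  sortedN.foldl (fun summary name =>
    summary ++ [(name, listings.foldl (fun t l => if l.2.1 == name then t + l.2.2 else t) 0)]) []

-- ===== PORT B =====
def get_neighborhood_value_summary_alt (listings : List (Int × String × Int)) : List (String × Int) :=
  let totals : PySem.Dict String Int :=
    listings.foldl (fun d l => d.modify l.2.1 0 (· + l.2.2)) PySem.Dict.empty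
  (PySem.List.sorted totals.keys (fun x => x) false).map (fun name => (name, totals.getD name 0))

-- ===== PRECONDITION & SPEC =====
def Spec_get_neighborhood_value_summary (listings : List (Int × String × Int)) (out : List (String × Int)) : Prop := out = get_neighborhood_value_summary_alt listings
instance (listings : List (Int × String × Int)) (out : List (String × Int)) : Decidable (Spec_get_neighborhood_value_summary listings out) := by unfold Spec_get_neighborhood_value_summary; infer_instance

-- ===== CLAIM (what is proved, stated in full; the proofs are below) =====
def Claim_equal_get_neighborhood_value_summary : Prop := ∀ (listings : List (Int × String × Int)), Dom_get_neighborhood_value_summary listings → Spec_get_neighborhood_value_summary listings (get_neighborhood_value_summary listings)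

-- ===== LEMMAS AND PROOFS =====

-- A's neighborhood-collecting loop is exactly PySem.Set.ofList of the names
lemma pv_names_eq (listings : List (Int × String × Int)) :
    listings.foldl (fun ns l => if l.2.1 ∈ ns then ns else ns ++ [l.2.1]) []
      = PySem.Set.ofList (listings.map (·.2.1)) := by
  rw [← PySem.Set.update_nil_left, PySem.Set.update_map_eq_foldl_add]
  have hf : (fun (ns : List String) (l : Int × String × Int) =>
      if l.2.1 ∈ ns then ns else ns ++ [l.2.1])
      = (fun ns l => PySem.Set.add ns l.2.1) := by
    funext ns l
    simp [PySem.Set.add, PySem.Set.contains]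
  rw [hf]

-- dict keys of B's fold = the same set
lemma pv_keys_eq (listings : List (Int × String × Int)) :
    (listings.foldl (fun d l => d.modify l.2.1 0 (· + l.2.2)) (PySem.Dict.empty : PySem.Dict String Int)).keys
      = PySem.Set.ofList (listings.map (·.2.1)) := by
  rw [PySem.Dict.keys_foldl_modify_key]
  simp [PySem.Dict.keys_empty, PySem.Set.update_nil_left]

-- shifting the accumulator of A's inner sum loop
lemma pv_sum_shift (l : List (Int × String × Int)) (name : String) (t : Int) :
    l.foldl (fun t l => if l.2.1 == name then t + l.2.2 else t) t
      = t + l.foldl (fun t l => if l.2.1 == name then t + l.2.2 else t) 0 := by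
  induction l generalizing t with
  | nil => simp
  | cons h tl ih =>
    simp only [List.foldl_cons]
    rw [ih (if h.2.1 == name then t + h.2.2 else t), ih (if h.2.1 == name then 0 + h.2.2 else 0)]
    split_ifs <;> ring

-- B's aggregated dict looks up to exactly A's inner sum
lemma pv_getD_fold (l : List (Int × String × Int)) (d : PySem.Dict String Int) (name : String) :
    (l.foldl (fun d l => d.modify l.2.1 0 (· + l.2.2)) d).getD name 0
      = d.getD name 0 + l.foldl (fun t l => if l.2.1 == name then t + l.2.2 else t) 0 := by
  induction l generalizing d with
  | nil => simp
  | cons h tl ih =>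
    simp only [List.foldl_cons]
    rw [ih, pv_sum_shift tl name (if h.2.1 == name then 0 + h.2.2 else 0),
        PySem.Dict.getD_modify]
    by_cases hname : name = h.2.1
    · subst hname; simp; ring
    · have hb : (h.2.1 == name) = false := beq_eq_false_iff_ne.mpr (Ne.symm hname)
      simp [hname, hb]

-- A's output-building foldl is a map
lemma pv_foldl_append_map (ns : List String) (f : String → Int) (acc : List (String × Int)) :
    ns.foldl (fun s n => s ++ [(n, f n)]) acc = acc ++ ns.map (fun n => (n, f n)) := by
  induction ns generalizing acc with
  | nil => simp
  | cons h tl ih => simp [ih]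

-- ===== VERDICT (by name: the statement is the Claim_ definition above) =====
theorem get_neighborhood_value_summary_spec : Claim_equal_get_neighborhood_value_summary := by
  intro listings _
  show _ = _
  unfold get_neighborhood_value_summary get_neighborhood_value_summary_alt
  simp only [pv_names_eq, pv_keys_eq, pv_foldl_append_map, List.nil_append]
  apply List.map_congr_left
  intro name _
  rw [pv_getD_fold]
  simp
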